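-- pv_equiv track=rewrite | github.com/maxence-glt/UC-Berkeley-CS61a | Discussions/Discussion 12.py | paths
-- ===== SOURCE A (Python) =====
-- def paths(x, y):
--     if x == y:
--         return [[x]]
--
--     if x > y:
--         return []
--
--     else:
--         a = [[x] + i for i in paths(x+1, y)]
--         b = [[x] + i for i in paths(x*2, y)]
--         return a + b
-- ===== SOURCE B (Python) =====
-- def paths(x, y):
--     if x == y:
--         return [[x]]
--     if x > y:
--         return []
--     memo = {y: [[y]]}
--     for t in range(y - 1, x - 1, -1):
--         a = memo.get(t + 1, [])
--         b = memo.get(2 * t, [])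
--         memo[t] = [[t] + p for p in a] + [[t] + p for p in b]
--     return memo[x]
-- ===== Notes on version B (the rewrite author's own statement) =====
-- stated objective: alternative
-- what changed: Replaced the top-down double recursion by a bottom-up dynamic program: one dictionary pass from y down to x computes each subproblem's path list once and the loop reads memoized entries instead of recursing; each shared subproblem is computed once, though measured times are comparable since A's call tree is roughly output-sized.
import Mathlib
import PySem

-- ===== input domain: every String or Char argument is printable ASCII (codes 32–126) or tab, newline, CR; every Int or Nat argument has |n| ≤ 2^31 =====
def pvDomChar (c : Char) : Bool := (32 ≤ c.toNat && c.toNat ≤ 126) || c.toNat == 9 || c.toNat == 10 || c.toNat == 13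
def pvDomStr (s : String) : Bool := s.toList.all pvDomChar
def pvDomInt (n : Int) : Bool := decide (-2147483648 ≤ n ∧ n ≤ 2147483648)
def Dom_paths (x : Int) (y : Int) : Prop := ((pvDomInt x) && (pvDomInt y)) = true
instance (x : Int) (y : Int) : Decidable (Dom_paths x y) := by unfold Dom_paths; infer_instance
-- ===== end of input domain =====

-- B replaces A's doubly-recursive enumeration by one bottom-up memoized dictionary pass (alternative algorithm; similar measured cost).

-- ===== PORT A =====
-- A's recursion, with a fuel parameter making it total in Lean; on Pre_ inputs the fuel
-- (y - x).toNat + 1 exceeds the recursion depth, so the port computes exactly what Python A computes there.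
def pathsFuel : Nat → Int → Int → List (List Int)
  | 0, _, _ => []
  | n + 1, x, y =>
    if x = y then [[x]]
    else if x > y then []
    else
      let a := (pathsFuel n (x + 1) y).map (fun i => x :: i)
      let b := (pathsFuel n (x * 2) y).map (fun i => x :: i)
      a ++ b

def paths (x : Int) (y : Int) : List (List Int) :=
  pathsFuel ((y - x).toNat + 1) x y

-- ===== PORT B =====
-- the body of Source B's for-loop, as a helper
def pvStep (memo : PySem.Dict Int (List (List Int))) (t : Int) : PySem.Dict Int (List (List Int)) :=
  let a := memo.getD (t + 1) []
  let b := memo.getD (2 * t) []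
  memo.insert t (a.map (fun p => t :: p) ++ b.map (fun p => t :: p))

def paths_alt (x : Int) (y : Int) : List (List Int) :=
  if x = y then [[x]]
  else if x > y then []
  else
    let memo0 : PySem.Dict Int (List (List Int)) := (PySem.Dict.empty).insert y [[y]]
    let memo := (PySem.List.pyRange (y - 1) (x - 1) (-1)).foldl pvStep memo0
    -- memo[x]: the loop always inserts key x here (x < y), so Python's KeyError cannot occur
    (memo.get? x).getD []

-- ===== PRECONDITION & SPEC =====
-- Pre_ excludes x ≤ 0 with x < y, where Python A recurses forever on x*2 and dies with RecursionError.
def Pre_paths (x : Int) (y : Int) : Prop := 1 ≤ x ∨ y ≤ x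
instance (x : Int) (y : Int) : Decidable (Pre_paths x y) := by unfold Pre_paths; infer_instance
def pvWitness_paths : Int × Int := (1, 6)
def Spec_paths (x : Int) (y : Int) (out : List (List Int)) : Prop := out = paths_alt x y
instance (x : Int) (y : Int) (out : List (List Int)) : Decidable (Spec_paths x y out) := by unfold Spec_paths; infer_instance

-- ===== CLAIM (what is proved, stated in full; the proofs are below) =====
def Claim_equal_paths : Prop := ∀ (x : Int) (y : Int), Dom_paths x y → Pre_paths x y → Spec_paths x y (paths x y)

-- ===== LEMMAS AND PROOFS =====

theorem pathsFuel_gt (n : Nat) (x y : Int) (h : y < x) : pathsFuel n x y = [] := by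
  cases n with
  | zero => rfl
  | succ k =>
    simp only [pathsFuel]
    rw [if_neg (by omega), if_pos (by omega)]

-- fuel irrelevance of A's recursion on the terminating region 1 ≤ x
theorem pathsFuel_mono (n : Nat) : ∀ (m : Nat) (x y : Int), 1 ≤ x → (y - x).toNat < n → n ≤ m →
    pathsFuel n x y = pathsFuel m x y := by
  induction n with
  | zero => intro m x y _ h _; omega
  | succ k ih =>
    intro m x y hx hn hm
    cases m with
    | zero => omega
    | succ l =>
      simp only [pathsFuel]
      by_cases h1 : x = y
      · simp [h1]
      · rw [if_neg h1, if_neg h1]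
        by_cases h2 : x > y
        · rw [if_pos h2, if_pos h2]
        · rw [if_neg h2, if_neg h2]
          have e1 : pathsFuel k (x + 1) y = pathsFuel l (x + 1) y :=
            ih l (x + 1) y (by omega) (by omega) (by omega)
          have e2 : pathsFuel k (x * 2) y = pathsFuel l (x * 2) y := by
            by_cases h3 : y < x * 2
            · rw [pathsFuel_gt k _ _ h3, pathsFuel_gt l _ _ h3]
            · exact ih l (x * 2) y (by omega) (by omega) (by omega)
          simp only [e1, e2]

-- the fold of B's loop after its first n iterations (proof-only abbreviation)
def pvFold (y : Int) (n : Nat) : PySem.Dict Int (List (List Int)) :=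
  ((List.range n).map (fun k : Nat => y - 1 - (k : Int))).foldl pvStep ((PySem.Dict.empty).insert y [[y]])

theorem pyRange_countdown (y : Int) (m : Nat) :
    PySem.List.pyRange (y - 1) (y - 1 - (m : Int)) (-1) = (List.range m).map (fun k : Nat => y - 1 - (k : Int)) := by
  rw [PySem.List.pyRange_neg_one]
  have h : (y - 1 - (y - 1 - (m : Int))).toNat = m := by omega
  rw [h]

-- loop invariant: after n iterations the memo holds exactly the subproblem answers for y-n … y
theorem memo_inv (x y : Int) (hx : 1 ≤ x) (hxy : x < y) :
    ∀ (n : Nat), n ≤ (y - x).toNat → ∀ t : Int,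
      (pvFold y n).get? t =
        if y - (n : Int) ≤ t ∧ t ≤ y then some (pathsFuel ((y - x).toNat + 1) t y) else none := by
  intro n
  induction n with
  | zero =>
    intro _ t
    simp only [pvFold, List.range_zero, List.map_nil, List.foldl_nil]

    rw [PySem.Dict.get?_insert]
    by_cases ht : t = y
    · subst ht
      rw [if_pos rfl, if_pos (by omega)]
      simp [pathsFuel]
    · rw [if_neg ht, if_neg (by omega), PySem.Dict.get?_empty]
  | succ n ihn =>
    intro hn t
    have ih := ihn (by omega)
    have hfold : pvFold y (n + 1) = pvStep (pvFold y n) (y - 1 - (n : Int)) := by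
      simp [pvFold, List.range_succ]
    set t' : Int := y - 1 - (n : Int) with ht'
    have ht'x : x ≤ t' := by omega
    have hVa : (pvFold y n).getD (t' + 1) [] = pathsFuel ((y - x).toNat + 1) (t' + 1) y := by
      rw [PySem.Dict.getD_eq_get?_getD, ih (t' + 1)]
      rw [if_pos (by omega)]
      rfl
    have hVb : (pvFold y n).getD (2 * t') [] = pathsFuel ((y - x).toNat + 1) (2 * t') y := by
      rw [PySem.Dict.getD_eq_get?_getD, ih (2 * t')]
      by_cases hb : 2 * t' ≤ y
      · rw [if_pos (by omega)]; rfl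
      · rw [if_neg (by omega), pathsFuel_gt _ _ _ (by omega)]; rfl
    have hval : pathsFuel ((y - x).toNat + 1) t' y =
        ((pvFold y n).getD (t' + 1) []).map (fun p => t' :: p) ++
        ((pvFold y n).getD (2 * t') []).map (fun p => t' :: p) := by
      rw [hVa, hVb]
      conv_lhs => rw [pathsFuel]
      rw [if_neg (by omega), if_neg (by omega)]
      have e1 : pathsFuel ((y - x).toNat) (t' + 1) y = pathsFuel ((y - x).toNat + 1) (t' + 1) y :=
        pathsFuel_mono _ _ _ _ (by omega) (by omega) (by omega)
      have e2 : pathsFuel ((y - x).toNat) (t' * 2) y = pathsFuel ((y - x).toNat + 1) (2 * t') y := by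
        by_cases hb : 2 * t' ≤ y
        · have : t' * 2 = 2 * t' := by ring
          rw [this]
          exact pathsFuel_mono _ _ _ _ (by omega) (by omega) (by omega)
        · rw [pathsFuel_gt _ _ _ (by omega), pathsFuel_gt _ _ _ (by omega)]
      simp only [e1, e2]
    rw [hfold]
    simp only [pvStep]
    rw [PySem.Dict.get?_insert]
    by_cases ht : t = t'
    · subst ht
      rw [if_pos rfl, if_pos (by omega), hval]
    · rw [if_neg ht, ih t]
      by_cases hin : y - (n : Int) ≤ t ∧ t ≤ y
      · rw [if_pos hin, if_pos (by omega)]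
      · rw [if_neg hin, if_neg (by omega)]

-- ===== VERDICT (by name: the statement is the Claim_ definition above) =====
theorem paths_spec : Claim_equal_paths := by
  intro x y _ hpre
  unfold Spec_paths paths paths_alt
  by_cases h1 : x = y
  · subst h1
    rw [if_pos rfl]
    simp [pathsFuel]
  · rw [if_neg h1]
    by_cases h2 : x > y
    · rw [if_pos h2]
      exact pathsFuel_gt _ _ _ h2
    · rw [if_neg h2]
      have hx : 1 ≤ x := by rcases hpre with h | h <;> omega
      have hxy : x < y := by omega
      have hK : x - 1 = y - 1 - (((y - x).toNat : Nat) : Int) := by omega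
      rw [hK, pyRange_countdown]
      show pathsFuel ((y - x).toNat + 1) x y = ((pvFold y ((y - x).toNat)).get? x).getD []
      rw [memo_inv x y hx hxy ((y - x).toNat) (le_refl _) x, if_pos (by omega)]
      rfl
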